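-- pv_equiv track=rewrite | github.com/delsiiin/KVCOMM | KVCOMM/utils/metrics.py | _choose_bin_step
-- ===== SOURCE A (Python) =====
-- import math
--
-- def _choose_bin_step(max_value: int, target_bins: int = 14) -> int:
--     if max_value <= 0:
--         return 1
--     rough = max(1, int(math.ceil(max_value / target_bins)))
--     magnitude = 10 ** int(math.floor(math.log10(rough)))
--     for multiplier in (1, 2, 5, 10):
--         step = multiplier * magnitude
--         if step >= rough:
--             return step
--     return rough
-- ===== SOURCE B (Python) =====
-- def _choose_bin_step(max_value: int, target_bins: int = 14) -> int:
--     if max_value <= 0: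
--         return 1
--     rough = -(-max_value // target_bins)  # ceil division
--     step, i = 1, 0
--     while step < rough:
--         # climb the nice numbers 1, 2, 5, 10, 20, 50, ... (factors 2, 2.5, 2)
--         step = step * 5 // 2 if i % 3 == 1 else step * 2
--         i += 1
--     return step
-- ===== Notes on version B (the rewrite author's own statement) =====
-- stated objective: simpler
-- what changed: B drops the float log10/magnitude computation and the multiplier table entirely: it ceil-divides with integers and climbs the nice numbers 1,2,5,10,20,50,... by repeatedly multiplying by the factor cycle 2, 5/2, 2 until the step reaches rough.
-- outside the precondition, e.g. on _choose_bin_step(5, 0): A raises ZeroDivisionError, B raises ZeroDivisionError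
import Mathlib
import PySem

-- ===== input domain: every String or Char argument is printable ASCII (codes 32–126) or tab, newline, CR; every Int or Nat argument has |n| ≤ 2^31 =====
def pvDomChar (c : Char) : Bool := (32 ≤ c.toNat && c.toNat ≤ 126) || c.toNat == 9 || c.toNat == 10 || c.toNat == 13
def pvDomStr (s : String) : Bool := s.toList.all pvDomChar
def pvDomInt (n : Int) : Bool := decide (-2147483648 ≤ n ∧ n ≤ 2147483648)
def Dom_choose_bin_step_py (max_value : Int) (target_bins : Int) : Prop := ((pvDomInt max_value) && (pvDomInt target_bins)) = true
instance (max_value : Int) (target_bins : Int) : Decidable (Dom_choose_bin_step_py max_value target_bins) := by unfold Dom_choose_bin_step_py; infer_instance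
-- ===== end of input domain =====

-- B replaces A's float log10 / magnitude-table scan by a log-free integer loop that climbs the
-- nice numbers 1,2,5,10,20,... (objective: simpler — no math import, no float round-trip).

-- ===== PORT A =====
-- int(math.floor(math.log10 n)) for an integer n ≥ 1: exact on the admitted domain (|max_value| ≤ 2^31,
-- so rough ≤ 2^31 and the float log10 floors to the decimal-digit count minus 1); ported by hand as
-- integer recursion since PySem has no float log10.
def pvFloorLog10 (n : Int) : Nat :=
  if h : n < 10 then 0 else 1 + pvFloorLog10 (n / 10)
termination_by n.toNat
decreasing_by
  have h1 := Int.mul_ediv_add_emod n 10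
  have h2 := Int.emod_nonneg n (by norm_num : (10:Int) ≠ 0)
  have h3 := Int.emod_lt_of_pos n (by norm_num : (0:Int) < 10)
  omega

-- the 'for multiplier in (1, 2, 5, 10)' scan, returning rough if no step qualifies
def pvScanA : List Int → Int → Int → Int
  | [], _, rough => rough
  | m :: ms, magnitude, rough =>
      if m * magnitude ≥ rough then m * magnitude else pvScanA ms magnitude rough

-- math.ceil(max_value / target_bins) ported as the exact ceiling division -((-max_value) // target_bins):
-- exact on the admitted domain, where the float quotient's ceiling equals the exact ceiling.
def choose_bin_step_py (max_value : Int) (target_bins : Int) : Int :=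
  if max_value ≤ 0 then 1
  else
    let rough := max 1 (-(PySem.Int.floordiv (-max_value) target_bins))
    let magnitude : Int := (10:Int) ^ pvFloorLog10 rough
    pvScanA [1, 2, 5, 10] magnitude rough

-- ===== PORT B =====
-- the while loop of Source B; the extra '1 ≤ step' conjunct only makes the recursion total
-- (step starts at 1 and only grows, so it never changes the result)
def pvAltLoop (rough : Int) (step : Int) (i : Nat) : Int :=
  if h : step < rough ∧ 1 ≤ step then
    pvAltLoop rough (if i % 3 = 1 then PySem.Int.floordiv (step * 5) 2 else step * 2) (i + 1)
  else step
termination_by (rough - step).toNat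
decreasing_by
  obtain ⟨hlt, hs⟩ := h
  have hfd : step + 1 ≤ PySem.Int.floordiv (step * 5) 2 := by
    rw [PySem.Int.floordiv_eq_ediv_of_pos (by norm_num)]
    have h1 := Int.mul_ediv_add_emod (step * 5) 2
    have h2 := Int.emod_nonneg (step * 5) (by norm_num : (2:Int) ≠ 0)
    have h3 := Int.emod_lt_of_pos (step * 5) (by norm_num : (0:Int) < 2)
    omega
  split <;> omega

def choose_bin_step_py_alt (max_value : Int) (target_bins : Int) : Int :=
  if max_value ≤ 0 then 1
  else
    let rough := -(PySem.Int.floordiv (-max_value) target_bins)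
    pvAltLoop rough 1 0

-- ===== PRECONDITION & SPEC =====
-- Pre_ excludes only target_bins = 0 with max_value > 0, where A raises ZeroDivisionError.
def Pre_choose_bin_step_py (max_value : Int) (target_bins : Int) : Prop :=
  max_value ≤ 0 ∨ target_bins ≠ 0
instance (max_value : Int) (target_bins : Int) : Decidable (Pre_choose_bin_step_py max_value target_bins) := by unfold Pre_choose_bin_step_py; infer_instance

def pvWitness_choose_bin_step_py : Int × Int := (1000, 14)

def Spec_choose_bin_step_py (max_value : Int) (target_bins : Int) (out : Int) : Prop := out = choose_bin_step_py_alt max_value target_bins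
instance (max_value : Int) (target_bins : Int) (out : Int) : Decidable (Spec_choose_bin_step_py max_value target_bins out) := by unfold Spec_choose_bin_step_py; infer_instance

-- ===== CLAIM (what is proved, stated in full; the proofs are below) =====
def Claim_equal_choose_bin_step_py : Prop := ∀ (max_value : Int) (target_bins : Int), Dom_choose_bin_step_py max_value target_bins → Pre_choose_bin_step_py max_value target_bins → Spec_choose_bin_step_py max_value target_bins (choose_bin_step_py max_value target_bins)

-- ===== LEMMAS AND PROOFS =====

-- floorLog10 brackets: 10^(pvFloorLog10 n) ≤ n < 10^(pvFloorLog10 n + 1) for n ≥ 1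
theorem pvFloorLog10_le (n : Int) (hn : 1 ≤ n) : (10:Int) ^ pvFloorLog10 n ≤ n := by
  fun_induction pvFloorLog10 n with
  | case1 n h => simpa using hn
  | case2 n h ih =>
      have h1 := Int.mul_ediv_add_emod n 10
      have h2 := Int.emod_nonneg n (by norm_num : (10:Int) ≠ 0)
      have h3 := Int.emod_lt_of_pos n (by norm_num : (0:Int) < 10)
      have hq : 1 ≤ n / 10 := by omega
      have := ih hq
      calc (10:Int) ^ (1 + pvFloorLog10 (n / 10)) = 10 * 10 ^ pvFloorLog10 (n / 10) := by
            rw [pow_add, pow_one]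
        _ ≤ 10 * (n / 10) := by omega
        _ ≤ n := by omega

theorem pvFloorLog10_lt (n : Int) (hn : 1 ≤ n) : n < (10:Int) ^ (pvFloorLog10 n + 1) := by
  fun_induction pvFloorLog10 n with
  | case1 n h => simpa using h
  | case2 n h ih =>
      have h1 := Int.mul_ediv_add_emod n 10
      have h2 := Int.emod_nonneg n (by norm_num : (10:Int) ≠ 0)
      have h3 := Int.emod_lt_of_pos n (by norm_num : (0:Int) < 10)
      have hq : 1 ≤ n / 10 := by omega
      have := ih hq
      have hp : (10:Int) ^ (1 + pvFloorLog10 (n / 10) + 1) = 10 * 10 ^ (pvFloorLog10 (n / 10) + 1) := by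
        ring
      rw [hp]
      omega

-- one decade of B's loop, unfolded three iterations
theorem pvAltLoop_decade (rough m : Int) (i : Nat) (hi : i % 3 = 0) (hm : 1 ≤ m) :
    pvAltLoop rough m i =
      if rough ≤ m then m else if rough ≤ 2 * m then 2 * m
      else if rough ≤ 5 * m then 5 * m else pvAltLoop rough (10 * m) (i + 3) := by
  have hi0 : ¬ i % 3 = 1 := by omega
  have hi1 : (i + 1) % 3 = 1 := by omega
  have hi2 : ¬ (i + 1 + 1) % 3 = 1 := by omega
  have hfd : PySem.Int.floordiv (m * 2 * 5) 2 = 5 * m := by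
    rw [PySem.Int.floordiv_eq_ediv_of_pos (by norm_num)]
    have he : m * 2 * 5 = 5 * m * 2 := by ring
    rw [he, Int.mul_ediv_cancel _ (by norm_num)]
  by_cases h1 : rough ≤ m
  · rw [pvAltLoop, dif_neg (by omega), if_pos h1]
  · rw [pvAltLoop, dif_pos ⟨by omega, hm⟩, if_neg hi0]
    by_cases h2 : rough ≤ 2 * m
    · rw [pvAltLoop, dif_neg (by omega), if_neg h1, if_pos h2]
      omega
    · rw [pvAltLoop, dif_pos ⟨by omega, by omega⟩, if_pos hi1, hfd]
      by_cases h3 : rough ≤ 5 * m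
      · rw [pvAltLoop, dif_neg (by omega), if_neg h1, if_neg h2, if_pos h3]
      · rw [pvAltLoop, dif_pos ⟨by omega, by omega⟩, if_neg hi2, if_neg h1, if_neg h2, if_neg h3]
        have h10 : 5 * m * 2 = 10 * m := by ring
        rw [h10]

-- in the final decade the loop returns the case value
theorem pvAltLoop_final (rough m : Int) (i : Nat) (hi : i % 3 = 0) (hm : 1 ≤ m)
    (hub : rough ≤ 10 * m) :
    pvAltLoop rough m i =
      if rough ≤ m then m else if rough ≤ 2 * m then 2 * m
      else if rough ≤ 5 * m then 5 * m else 10 * m := by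
  rw [pvAltLoop_decade rough m i hi hm]
  by_cases h1 : rough ≤ m
  · simp [h1]
  by_cases h2 : rough ≤ 2 * m
  · simp [h1, h2]
  by_cases h3 : rough ≤ 5 * m
  · simp [h1, h2, h3]
  simp only [if_neg h1, if_neg h2, if_neg h3]
  rw [pvAltLoop, dif_neg (by omega)]

-- while rough is above the decade, B's loop just scales the decade up
theorem pvAltLoop_chain (rough : Int) (e : Nat) (h : (10:Int) ^ e ≤ rough) :
    pvAltLoop rough 1 0 = pvAltLoop rough ((10:Int) ^ e) (3 * e) := by
  induction e with
  | zero => simp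
  | succ e ih =>
      have hm : (1:Int) ≤ 10 ^ e := one_le_pow₀ (by norm_num)
      have hs : (10:Int) ^ (e + 1) = 10 * 10 ^ e := by rw [pow_succ]; ring
      have h' : (10:Int) ^ e ≤ rough := by
        have : (10:Int) ^ e ≤ 10 ^ (e + 1) := by
          calc (10:Int) ^ e ≤ 10 * 10 ^ e := by omega
            _ = 10 ^ (e + 1) := hs.symm
        omega
      rw [ih h', pvAltLoop_decade rough _ _ (by omega) hm]
      rw [if_neg (by omega), if_neg (by omega), if_neg (by omega)]
      rw [hs]
      have h3 : 3 * e + 3 = 3 * (e + 1) := by omega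
      rw [h3]

-- main agreement for a common rough value
theorem pv_main (r0 : Int) :
    (let rough := max 1 r0;
     pvScanA [1, 2, 5, 10] ((10:Int) ^ pvFloorLog10 rough) rough) = pvAltLoop r0 1 0 := by
  by_cases hle : r0 ≤ 1
  · have hmax : max 1 r0 = 1 := by omega
    simp only [hmax]
    rw [pvAltLoop, dif_neg (by omega)]
    have h0 : pvFloorLog10 1 = 0 := by rw [pvFloorLog10]; norm_num
    rw [h0]
    simp only [pvScanA]
    norm_num
  · have hmax : max 1 r0 = r0 := by omega
    simp only [hmax]
    have h1 : (1:Int) ≤ r0 := by omega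
    have hlo := pvFloorLog10_le r0 h1
    have hhi := pvFloorLog10_lt r0 h1
    set e := pvFloorLog10 r0 with he
    have hm : (1:Int) ≤ 10 ^ e := one_le_pow₀ (by norm_num)
    have hs : (10:Int) ^ (e + 1) = 10 * 10 ^ e := by rw [pow_succ]; ring
    rw [pvAltLoop_chain r0 e hlo,
        pvAltLoop_final r0 _ _ (by omega) hm (by omega)]
    simp only [pvScanA]
    split_ifs <;> omega

-- ===== VERDICT (by name: the statement is the Claim_ definition above) =====
theorem choose_bin_step_py_spec : Claim_equal_choose_bin_step_py := by
  intro mv tb _ _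
  unfold Spec_choose_bin_step_py choose_bin_step_py choose_bin_step_py_alt
  by_cases h : mv ≤ 0
  · simp [h]
  · simp only [h, if_false]
    exact pv_main _
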